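-- pv_equiv track=rewrite | github.com/changediyasunny/assignments | bonus/cluster.py | prune_terms
-- ===== SOURCE A (Python) =====
-- from collections import Counter
--
-- def prune_terms(docs, min_df=3):
--     """ Remove terms that don't occur in at least min_df different
--     documents. Return a list of Counters. Omit documents that are empty after
--     pruning words.
--     >>> prune_terms([{'a': 1, 'b': 10}, {'a': 1}, {'c': 1}], min_df=2)
--     [Counter({'a': 1}), Counter({'a': 1})]
--     """
--     ###TODO
--
--     # Used to store DF values of keys terms
--     doc_freqs = {}
--     pruned_vocab = []
--     profiles = []
--
--     # 1. Compute df values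
--     for dicts in docs:
--
--         for key in set(dicts.keys()):
--             try:
--             	doc_freqs[key] += 1
--             except:
--             	doc_freqs[key] = 1
--
--     # 2. Create pruned vocab of terms
--     for key, df_val in doc_freqs.items():
--     	if df_val >= min_df:
--     		pruned_vocab.append(key)
--
--     # 3. loop through dict, remove terms not in pruned_vocab
--     for dicts in docs:
--
--     	some_dict = {key: val for key, val in dicts.items() if key in pruned_vocab}
--
--     	# Check for empty dictionary
--     	if some_dict:
--     		profiles.append(Counter(some_dict))
--
--     return profiles
-- ===== SOURCE B (Python) =====
-- from collections import Counter
--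
-- def prune_terms(docs, min_df=3):
--     """Keep a term iff it occurs in at least min_df documents, computing each
--     term's document frequency directly by scanning the documents; no df table,
--     no pruned-vocabulary list."""
--     def df(term):
--         return sum(term in d for d in docs)
--     profiles = [Counter({t: v for t, v in d.items() if df(t) >= min_df}) for d in docs]
--     return [p for p in profiles if p]
-- ===== Notes on version B (the rewrite author's own statement) =====
-- stated objective: simpler
-- what changed: Replaces A's three-phase pipeline (df-table dict built with try/except, explicit pruned-vocabulary list, then list-membership filtering) with a direct definition: a term's document frequency is recomputed by scanning the documents, and the pruned profiles are two comprehensions.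
import Mathlib
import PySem

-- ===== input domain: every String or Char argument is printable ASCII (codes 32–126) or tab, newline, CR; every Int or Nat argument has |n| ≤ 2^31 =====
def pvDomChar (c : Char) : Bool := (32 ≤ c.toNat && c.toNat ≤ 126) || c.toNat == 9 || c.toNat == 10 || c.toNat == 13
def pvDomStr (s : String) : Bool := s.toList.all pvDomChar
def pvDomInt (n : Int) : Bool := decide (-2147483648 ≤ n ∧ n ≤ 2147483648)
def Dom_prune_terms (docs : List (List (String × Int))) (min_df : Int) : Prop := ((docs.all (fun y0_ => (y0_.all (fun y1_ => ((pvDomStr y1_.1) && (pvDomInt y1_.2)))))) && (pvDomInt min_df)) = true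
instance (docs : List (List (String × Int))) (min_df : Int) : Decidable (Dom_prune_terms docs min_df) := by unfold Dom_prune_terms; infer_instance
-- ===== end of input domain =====

-- B replaces A's df-table dict and pruned-vocabulary list with a direct per-term document-frequency
-- scan and two comprehensions (objective: simpler; comparable cost).
-- Each document parameter is a Python dict; both ports read it through PySem.Dict.ofList (dict(pairs): last value wins).

-- ===== PORT A =====
def prune_terms (docs : List (List (String × Int))) (min_df : Int) : List (List (String × Int)) :=
  -- 1. compute df values (the try/except increment = modify with default 0; iterating set(keys)
  --    only increments counts, and the resulting dict is only looked up afterwards)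
  let doc_freqs : PySem.Dict String Int :=
    docs.foldl (fun dfq d =>
      (PySem.Set.ofList (PySem.Dict.ofList d).keys).foldl
        (fun dfq key => dfq.modify key 0 (· + 1)) dfq) PySem.Dict.empty
  -- 2. pruned vocab of terms
  let pruned_vocab : List String :=
    doc_freqs.items.foldl (fun acc p => if min_df ≤ p.2 then acc ++ [p.1] else acc) []
  -- 3. filter each doc by pruned_vocab, keep non-empty (Counter(d) keeps d's item order)
  docs.foldl (fun profiles d =>
    let some_dict := (PySem.Dict.ofList d).items.filter (fun p => pruned_vocab.contains p.1)
    if !some_dict.isEmpty then profiles ++ [some_dict] else profiles) []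

-- ===== PORT B =====
def prune_terms_alt (docs : List (List (String × Int))) (min_df : Int) : List (List (String × Int)) :=
  -- df(term) = sum(term in d for d in docs)
  let df : String → Int := fun t =>
    (docs.map (fun d => if (PySem.Dict.ofList d).contains t then (1 : Int) else 0)).sum
  let profiles : List (List (String × Int)) :=
    docs.map (fun d => (PySem.Dict.ofList d).items.filter (fun p => decide (min_df ≤ df p.1)))
  profiles.filter (fun p => !p.isEmpty)

-- ===== PRECONDITION & SPEC =====
def Spec_prune_terms (docs : List (List (String × Int))) (min_df : Int) (out : List (List (String × Int))) : Prop := out = prune_terms_alt docs min_df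
instance (docs : List (List (String × Int))) (min_df : Int) (out : List (List (String × Int))) : Decidable (Spec_prune_terms docs min_df out) := by unfold Spec_prune_terms; infer_instance

-- ===== CLAIM (what is proved, stated in full; the proofs are below) =====
def Claim_equal_prune_terms : Prop := ∀ (docs : List (List (String × Int))) (min_df : Int), Dom_prune_terms docs min_df → Spec_prune_terms docs min_df (prune_terms docs min_df)

-- ===== LEMMAS AND PROOFS =====

-- A's df-accumulation loop, named so the invariant lemmas can speak about it
def pvDfLoop (docs : List (List (String × Int))) (init : PySem.Dict String Int) : PySem.Dict String Int :=
  docs.foldl (fun dfq d =>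
    (PySem.Set.ofList (PySem.Dict.ofList d).keys).foldl
      (fun dfq key => dfq.modify key 0 (· + 1)) dfq) init

-- B's document-frequency sum, named for the same purpose
def pvDf (docs : List (List (String × Int))) (t : String) : Int :=
  (docs.map (fun d => if (PySem.Dict.ofList d).contains t then (1 : Int) else 0)).sum

-- A's df table holds exactly B's document-frequency counts
lemma pvDfLoop_getD (docs : List (List (String × Int))) (init : PySem.Dict String Int) (t : String) :
    (pvDfLoop docs init).getD t 0 = init.getD t 0 + pvDf docs t := by
  induction docs generalizing init with
  | nil => simp [pvDfLoop, pvDf]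
  | cons d rest ih =>
    simp only [pvDfLoop, List.foldl_cons, pvDf, List.map_cons, List.sum_cons] at *
    rw [ih, PySem.Dict.getD_foldl_modify_add_one,
        PySem.Set.ofList_eq_self_of_nodup ((PySem.Dict.ofList d).keys) (PySem.Dict.nodup_keys_ofList d)]
    by_cases h : (PySem.Dict.ofList d).contains t
    · have hm : t ∈ (PySem.Dict.ofList d).keys := (PySem.Dict.contains_iff_mem_keys _ _).1 h
      rw [List.count_eq_one_of_mem (PySem.Dict.nodup_keys_ofList d) hm]
      simp [h]; ring
    · have hm : t ∉ (PySem.Dict.ofList d).keys := fun hm => h ((PySem.Dict.contains_iff_mem_keys _ _).2 hm)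
      rw [List.count_eq_zero_of_not_mem hm]
      simp [h]

lemma pvDfLoop_keys_nodup (docs : List (List (String × Int))) (init : PySem.Dict String Int)
    (h : init.keys.Nodup) : (pvDfLoop docs init).keys.Nodup := by
  induction docs generalizing init with
  | nil => simpa [pvDfLoop] using h
  | cons d rest ih =>
    simp only [pvDfLoop, List.foldl_cons] at *
    exact ih _ (PySem.Dict.nodup_keys_foldl_modify_key _ id _ _ _ h)

-- a term is a key of A's df table iff some document contains it
lemma pvDfLoop_mem_keys (docs : List (List (String × Int))) (init : PySem.Dict String Int) (t : String) :
    t ∈ (pvDfLoop docs init).keys ↔ t ∈ init.keys ∨ ∃ d ∈ docs, (PySem.Dict.ofList d).contains t := by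
  induction docs generalizing init with
  | nil => simp [pvDfLoop]
  | cons d rest ih =>
    simp only [pvDfLoop, List.foldl_cons] at *
    rw [ih]
    rw [show (List.foldl (fun dfq key => dfq.modify key 0 fun x => x + 1) init
          (PySem.Set.ofList (PySem.Dict.ofList d).keys)).keys
        = PySem.Set.update init.keys (PySem.Set.ofList (PySem.Dict.ofList d).keys)
      from PySem.Dict.keys_foldl_modify _ _ _ _]
    simp [PySem.Set.mem_update, PySem.Set.mem_ofList, PySem.Dict.contains_iff_mem_keys, List.mem_cons]
    tauto

-- membership in A's pruned_vocab, characterised by the df table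
lemma pv_mem_pruned (dfq : PySem.Dict String Int) (min_df : Int) (t : String) (hnd : dfq.keys.Nodup) :
    t ∈ dfq.items.foldl (fun acc p => if min_df ≤ p.2 then acc ++ [p.1] else acc) [] ↔
      t ∈ dfq.keys ∧ min_df ≤ dfq.getD t 0 := by
  rw [show (fun (acc : List String) (p : String × Int) => if min_df ≤ p.2 then acc ++ [p.1] else acc)
      = (fun acc p => if decide (min_df ≤ p.2) then acc ++ [p.1] else acc) by
    funext acc p; by_cases h : min_df ≤ p.2 <;> simp [h]]
  rw [PySem.List.foldl_append_if]
  rw [PySem.Dict.items_eq_map_keys dfq hnd 0]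
  simp only [List.nil_append, List.mem_map, List.mem_filter]
  constructor
  · rintro ⟨p, ⟨⟨k, hk, rfl⟩, hge⟩, rfl⟩
    exact ⟨hk, by simpa using hge⟩
  · rintro ⟨hk, hge⟩
    exact ⟨(t, dfq.getD t 0), ⟨⟨t, hk, rfl⟩, by simpa using hge⟩, rfl⟩

-- ===== VERDICT (by name: the statement is the Claim_ definition above) =====
theorem prune_terms_spec : Claim_equal_prune_terms := by
  intro docs min_df _
  show prune_terms docs min_df = prune_terms_alt docs min_df
  simp only [prune_terms, prune_terms_alt]
  have hnd : (pvDfLoop docs PySem.Dict.empty).keys.Nodup :=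
    pvDfLoop_keys_nodup docs _ (by simp [PySem.Dict.keys_empty])
  -- the two per-document filters agree
  have hcong : ∀ d ∈ docs,
      (PySem.Dict.ofList d).items.filter (fun p =>
        ((pvDfLoop docs PySem.Dict.empty).items.foldl
          (fun acc p => if min_df ≤ p.2 then acc ++ [p.1] else acc) []).contains p.1)
      = (PySem.Dict.ofList d).items.filter (fun p => decide (min_df ≤ pvDf docs p.1)) := by
    intro d hd
    apply List.filter_congr
    intro p hp
    have hk : (PySem.Dict.ofList d).contains p.1 := by
      rw [PySem.Dict.contains_iff_mem_keys]
      exact PySem.Dict.mem_keys_of_mem_items _ hp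
    have hmem : p.1 ∈ (pvDfLoop docs PySem.Dict.empty).keys := by
      rw [pvDfLoop_mem_keys]
      exact Or.inr ⟨d, hd, hk⟩
    have := pv_mem_pruned (pvDfLoop docs PySem.Dict.empty) min_df p.1 hnd
    rw [pvDfLoop_getD] at this
    simp only [PySem.Dict.getD_empty, zero_add] at this
    by_cases hge : min_df ≤ pvDf docs p.1 <;>
      simp [this, hmem, hge]
  simp only [pvDfLoop] at hcong
  rw [PySem.List.foldl_append_if, List.filter_map]
  rw [List.filter_congr (fun d hd => by rw [hcong d hd])]
  rw [List.nil_append]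
  apply List.map_congr_left
  intro d hd
  exact hcong d (List.mem_filter.mp hd).1
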